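-- pv_equiv track=rewrite | github.com/Hyeokiki/programmers-coding-test-practice | Python/level2/메뉴 리뉴얼.py | solution
-- ===== SOURCE A (Python) =====
-- from itertools import combinations
--
-- def solution(orders, course):
--     answer = []
--     setMenu = {}
--     maxMenu = [[] for i in range(len(course))]
--     maxCount = [1] * len(course)
--     for order in orders:
--         orderList = list(order)
--         for index, count in enumerate(course):
--             for food in combinations(orderList, count):
--                 foodString = ''.join(sorted(list(food)))
--                 if foodString in setMenu.keys():
--                     setMenu[foodString] += 1
--                 else:
--                     setMenu[foodString] = 1
--
--                 if maxCount[index] < setMenu[foodString]: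
--                     maxCount[index] = setMenu[foodString]
--                     maxMenu[index] = [foodString]
--                 if maxCount[index] == setMenu[foodString] and maxCount[index] != 1:
--                     if foodString not in maxMenu[index]:
--                         maxMenu[index].append(foodString)
--     for menus in maxMenu:
--         for menu in menus:
--             answer.append(menu)
--     return sorted(answer)
-- ===== SOURCE B (Python) =====
-- from itertools import combinations
--
--
-- def solution(orders, course):
--     # Count every (order, course-entry, combination) once into a single table,
--     # then select the per-size winners in a separate pass.
--     counts = {}
--     for order in orders:
--         for c in course:
--             for food in combinations(order, c):
--                 key = ''.join(sorted(food))
--                 counts[key] = counts.get(key, 0) + 1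
--     answer = []
--     for c in course:
--         group = [(k, v) for k, v in counts.items() if len(k) == c]
--         best = max([v for _, v in group], default=0)
--         if best >= 2:
--             answer += [k for k, v in group if v == best]
--     return sorted(answer)
-- ===== Notes on version B (the rewrite author's own statement) =====
-- stated objective: simpler
-- what changed: A tracks per-course-index running maxima and argmax lists inline while counting; B first builds one count table over all (order, course-entry, combination) events and then, in a separate selection pass per course size, takes every key of that length attaining the maximal count when that maximum is at least 2.
-- outside the precondition, e.g. on solution(['abb', 'cd', 'cd'], [2, 2]): A returns ['ab', 'cd', 'cd'], B returns ['ab', 'ab', 'cd', 'cd']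
import Mathlib
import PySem

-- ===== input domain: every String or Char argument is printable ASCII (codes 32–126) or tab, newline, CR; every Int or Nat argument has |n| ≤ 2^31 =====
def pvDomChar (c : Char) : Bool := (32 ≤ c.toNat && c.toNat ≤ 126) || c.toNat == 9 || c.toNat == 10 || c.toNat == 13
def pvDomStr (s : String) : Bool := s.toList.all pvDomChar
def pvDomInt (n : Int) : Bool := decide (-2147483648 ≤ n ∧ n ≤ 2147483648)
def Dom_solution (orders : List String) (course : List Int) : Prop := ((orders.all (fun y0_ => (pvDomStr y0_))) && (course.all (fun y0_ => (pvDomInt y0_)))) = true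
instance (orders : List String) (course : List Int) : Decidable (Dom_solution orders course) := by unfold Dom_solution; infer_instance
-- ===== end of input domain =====

-- B replaces A's inline per-course-index max/argmax bookkeeping by one shared count
-- table built first and a separate per-size selection pass (count-all-then-select).

-- shared helper: ''.join(sorted(food)) — both Pythons contain this exact expression.
-- Exact on the ASCII domain: Python sorts/compares 1-char strings by code point, as Char here.
def pvKey (food : List Char) : String := String.ofList (PySem.List.sorted food (fun c => c))

-- ===== PORT A =====
-- the body of A's innermost loop: index = idx, food = food; state (setMenu, maxMenu, maxCount)
def pvStepA (st : PySem.Dict String Int × List (List String) × List Int) (idx : Int) (food : List Char) :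
    PySem.Dict String Int × List (List String) × List Int :=
  let foodString := pvKey food
  let setMenu := if st.1.contains foodString
    then st.1.insert foodString (st.1.getD foodString 0 + 1)
    else st.1.insert foodString 1
  let cnt := setMenu.getD foodString 0
  let (maxMenu, maxCount) :=
    if (st.2.2.getD idx.toNat 0) < cnt
      then (st.2.1.set idx.toNat [foodString], st.2.2.set idx.toNat cnt)
      else (st.2.1, st.2.2)
  let maxMenu :=
    if maxCount.getD idx.toNat 0 == cnt && maxCount.getD idx.toNat 0 != 1 then
      if foodString ∈ maxMenu.getD idx.toNat [] then maxMenu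
      else maxMenu.set idx.toNat (maxMenu.getD idx.toNat [] ++ [foodString])
    else maxMenu
  (setMenu, maxMenu, maxCount)

def solution (orders : List String) (course : List Int) : List String :=
  let init : PySem.Dict String Int × List (List String) × List Int :=
    (PySem.Dict.empty, (List.range course.length).map (fun _ => ([] : List String)),
      List.replicate course.length (1 : Int))
  let fin := orders.foldl (fun st order =>
    (PySem.List.enumerate course).foldl (fun st ic =>
      (PySem.List.combinations order.toList ic.2.toNat).foldl
        (fun st food => pvStepA st ic.1 food) st) st) init
  let answer := fin.2.1.foldl (fun acc menus =>
    menus.foldl (fun acc menu => acc ++ [menu]) acc) ([] : List String)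
  PySem.List.sorted answer (fun x => x)

-- ===== PORT B =====
def solution_alt (orders : List String) (course : List Int) : List String :=
  let counts := orders.foldl (fun d order =>
    course.foldl (fun d c =>
      (PySem.List.combinations order.toList c.toNat).foldl (fun d food =>
        let key := pvKey food
        d.insert key (d.getD key 0 + 1)) d) d) PySem.Dict.empty
  let answer := course.foldl (fun acc c =>
    let group := counts.items.filter (fun kv => PySem.Str.len kv.1 == c)
    let best : Int := PySem.List.maxD (group.map (fun kv => kv.2)) (fun v => v) 0
    if 2 ≤ best then acc ++ (group.filter (fun kv => kv.2 == best)).map (fun kv => kv.1)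
    else acc) ([] : List String)
  PySem.List.sorted answer (fun x => x)

-- ===== PRECONDITION & SPEC =====
-- Pre_ excludes (a) a negative course entry, on which A raises ValueError, and
-- (b) duplicate course entries that some order is long enough to satisfy, a corner no
-- one would specify: A's shared counter then counts every same-size combination once
-- per duplicate entry and the per-index winner sets depend on the accidental
-- interleaving of those increments (duplicates larger than every order stay admitted:
-- they produce no combinations).
def Pre_solution (orders : List String) (course : List Int) : Prop :=
  (∀ c ∈ course, 0 ≤ c) ∧
  course.Pairwise (fun a b => a = b → ∀ o ∈ orders, PySem.Str.len o < a)
instance (orders : List String) (course : List Int) : Decidable (Pre_solution orders course) := by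
  unfold Pre_solution; infer_instance

def pvWitness_solution : List String × List Int := (["abcd", "bcd", "bc"], [2, 3])

def Spec_solution (orders : List String) (course : List Int) (out : List String) : Prop := out = solution_alt orders course
instance (orders : List String) (course : List Int) (out : List String) : Decidable (Spec_solution orders course out) := by unfold Spec_solution; infer_instance

-- ===== CLAIM (what is proved, stated in full; the proofs are below) =====
def Claim_equal_solution : Prop := ∀ (orders : List String) (course : List Int), Dom_solution orders course → Pre_solution orders course → Spec_solution orders course (solution orders course)

-- ===== LEMMAS AND PROOFS =====

-- the flat stream of (course index, combination) events, in A's processing order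
def pvEvents (orders : List String) (course : List Int) : List (Int × List Char) :=
  orders.flatMap (fun o =>
    (PySem.List.enumerate course).flatMap (fun ic =>
      (PySem.List.combinations o.toList ic.2.toNat).map (fun f => (ic.1, f))))

theorem pvA_flatten (orders : List String) (course : List Int)
    (init : PySem.Dict String Int × List (List String) × List Int) :
    orders.foldl (fun st order =>
      (PySem.List.enumerate course).foldl (fun st ic =>
        (PySem.List.combinations order.toList ic.2.toNat).foldl
          (fun st food => pvStepA st ic.1 food) st) st) init
    = (pvEvents orders course).foldl (fun st e => pvStepA st e.1 e.2) init := by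
  simp only [pvEvents, List.foldl_flatMap, List.foldl_map]

theorem pvB_flatten (orders : List String) (course : List Int) :
    orders.foldl (fun d order =>
      course.foldl (fun d c =>
        (PySem.List.combinations order.toList c.toNat).foldl (fun d food =>
          let key := pvKey food
          d.insert key (d.getD key 0 + 1)) d) d) PySem.Dict.empty
    = PySem.Dict.counter ((pvEvents orders course).map (fun e => pvKey e.2)) := by
  rw [← PySem.Dict.foldl_insert_getD_add_one_eq_counter]
  simp only [pvEvents, List.map_flatMap, List.map_map, List.foldl_flatMap, List.foldl_map,
    Function.comp]
  have key : (fun (d : PySem.Dict String Int) (order : String) =>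
      course.foldl (fun d c => (PySem.List.combinations order.toList c.toNat).foldl (fun d food =>
        d.insert (pvKey food) (d.getD (pvKey food) 0 + 1)) d) d)
    = (fun (d : PySem.Dict String Int) (order : String) =>
      (PySem.List.enumerate course).foldl (fun d ic =>
        (PySem.List.combinations order.toList ic.2.toNat).foldl (fun d food =>
          d.insert (pvKey food) (d.getD (pvKey food) 0 + 1)) d) d) := by
    funext d order
    rw [show course = (PySem.List.enumerate course).map (fun x => x.2) from
      (PySem.List.map_snd_enumerate course 0).symm, List.foldl_map]
    simp [PySem.List.map_snd_enumerate]
  rw [key]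

-- every event's index is in range, its key has exactly the size of its course entry,
-- and some order is long enough to produce it
theorem pvEvents_ok (orders : List String) (course : List Int)
    (hnn : ∀ c ∈ course, 0 ≤ c) :
    ∀ e ∈ pvEvents orders course, ∃ k : Nat, ∃ hk : k < course.length,
      e.1 = (k : Int) ∧ PySem.Str.len (pvKey e.2) = course[k] ∧
      ∃ o ∈ orders, course[k] ≤ PySem.Str.len o := by
  intro e he
  simp only [pvEvents, List.mem_flatMap, List.mem_map] at he
  obtain ⟨o, ho, ic, hic, f, hf, rfl⟩ := he
  rw [PySem.List.mem_enumerate_iff] at hic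
  obtain ⟨k, hk, rfl⟩ := hic
  have hlf : f.length = (course[k]).toNat := PySem.List.length_of_mem_combinations hf
  have h0 : 0 ≤ course[k] := hnn _ (List.getElem_mem hk)
  have hsub : f.length ≤ o.toList.length :=
    (PySem.List.sublist_of_mem_combinations hf).length_le
  refine ⟨k, hk, by simp, ?_, o, ho, ?_⟩
  · simp only [pvKey, PySem.Str.len_eq, String.toList_ofList, PySem.List.length_sorted, hlf]
    omega
  · rw [PySem.Str.len_eq]
    omega


-- plumbing for in-range list access in the invariant proofs
theorem pvGetD_getBang {α : Type} [Inhabited α] (l : List α) (i : Nat) (d : α)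
    (h : i < l.length) : l.getD i d = l[i]! := by
  rw [getElem!_pos l i h]; simp [List.getD_eq_getElem?_getD, List.getElem?_eq_getElem h]

theorem pvSet_getBang_self {α : Type} [Inhabited α] (l : List α) (j : Nat) (x : α)
    (h : j < l.length) : (l.set j x)[j]! = x := by
  rw [getElem!_pos (l.set j x) j (by simpa using h)]; exact List.getElem_set_self _

theorem pvSet_getBang_ne {α : Type} [Inhabited α] (l : List α) (i j : Nat) (x : α)
    (h : i < l.length) (hne : j ≠ i) : (l.set j x)[i]! = l[i]! := by
  rw [getElem!_pos (l.set j x) i (by simpa using h), getElem!_pos l i h]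
  exact List.getElem_set_ne hne _

theorem pvCounter_snoc (ks : List String) (s : String) :
    PySem.Dict.counter (ks ++ [s])
      = (PySem.Dict.counter ks).insert s ((PySem.Dict.counter ks).getD s 0 + 1) := by
  rw [← PySem.Dict.foldl_insert_getD_add_one_eq_counter,
    ← PySem.Dict.foldl_insert_getD_add_one_eq_counter, List.foldl_append]
  simp

-- the loop invariant of A's online max tracking
def pvInv (course : List Int) (ks : List String)
    (st : PySem.Dict String Int × List (List String) × List Int) : Prop :=
  st.1 = PySem.Dict.counter ks ∧
  st.2.1.length = course.length ∧ st.2.2.length = course.length ∧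
  ∀ i : Nat, ∀ hi : i < course.length,
    1 ≤ st.2.2[i]! ∧
    (∀ k : String, PySem.Str.len k = course[i] → (ks.count k : Int) ≤ st.2.2[i]!) ∧
    (st.2.2[i]! = 1 ∨ ∃ k, PySem.Str.len k = course[i] ∧ (ks.count k : Int) = st.2.2[i]!) ∧
    (st.2.2[i]! = 1 → st.2.1[i]! = []) ∧
    (st.2.2[i]! ≠ 1 → st.2.1[i]!.Nodup ∧
      ∀ k, k ∈ st.2.1[i]! ↔ (PySem.Str.len k = course[i] ∧ (ks.count k : Int) = st.2.2[i]!))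

theorem pvInv_step (course : List Int) (ks : List String)
    (st : PySem.Dict String Int × List (List String) × List Int)
    (h : pvInv course ks st) (j : Nat) (hj : j < course.length) (food : List Char)
    (hlen : PySem.Str.len (pvKey food) = course[j])
    (hdist : ∀ (i : Nat) (hi : i < course.length), i ≠ j → course[i] ≠ course[j]) :
    pvInv course (ks ++ [pvKey food]) (pvStepA st (j : Int) food) := by
  obtain ⟨hd, hlm, hlc, hidx⟩ := h
  have hjm : j < st.2.1.length := by rw [hlm]; exact hj
  have hjc : j < st.2.2.length := by rw [hlc]; exact hj
  set s := pvKey food with hs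
  have hd' : (if st.1.contains s then st.1.insert s (st.1.getD s 0 + 1) else st.1.insert s 1)
      = PySem.Dict.counter (ks ++ [s]) := by
    rw [pvCounter_snoc, hd]
    by_cases hc : (PySem.Dict.counter ks).contains s
    · simp [hc]
    · rw [if_neg (by simp [hc]), PySem.Dict.getD_of_not_contains _ 0 (Bool.not_eq_true _ ▸ eq_false_of_ne_true hc), zero_add]
  have hcnt : (PySem.Dict.counter (ks ++ [s])).getD s 0 = (ks.count s : Int) + 1 := by
    simp [PySem.Dict.getD_counter, List.count_append]
  have hcount : ∀ k : String, ((ks ++ [s]).count k : Int)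
      = (ks.count k : Int) + (if k = s then 1 else 0) := by
    intro k; by_cases hks : k = s
    · simp [List.count_append, hks]
    · simp [List.count_append, hks, Ne.symm hks]
  have hne_of_len : ∀ (i : Nat) (hi : i < course.length), i ≠ j →
      ∀ k : String, PySem.Str.len k = course[i] → k ≠ s := by
    intro i hi hij k hk hks
    rw [hks, hlen] at hk
    exact hdist i hi hij hk.symm
  have hother : ∀ (i : Nat) (hi : i < course.length), i ≠ j →
      1 ≤ st.2.2[i]! ∧
      (∀ k : String, PySem.Str.len k = course[i] → ((ks ++ [s]).count k : Int) ≤ st.2.2[i]!) ∧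
      (st.2.2[i]! = 1 ∨ ∃ k, PySem.Str.len k = course[i] ∧ ((ks ++ [s]).count k : Int) = st.2.2[i]!) ∧
      (st.2.2[i]! = 1 → st.2.1[i]! = []) ∧
      (st.2.2[i]! ≠ 1 → st.2.1[i]!.Nodup ∧
        ∀ k, k ∈ st.2.1[i]! ↔ (PySem.Str.len k = course[i] ∧ ((ks ++ [s]).count k : Int) = st.2.2[i]!)) := by
    intro i hi hij
    obtain ⟨o1, o2, o3, o4, o5⟩ := hidx i hi
    have hrw : ∀ k : String, PySem.Str.len k = course[i] →
        ((ks ++ [s]).count k : Int) = (ks.count k : Int) := by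
      intro k hk
      rw [hcount k, if_neg (hne_of_len i hi hij k hk), add_zero]
    refine ⟨o1, fun k hk => by rw [hrw k hk]; exact o2 k hk, ?_, o4, ?_⟩
    · rcases o3 with h1 | ⟨k, hk, hkc⟩
      · exact Or.inl h1
      · exact Or.inr ⟨k, hk, by rw [hrw k hk]; exact hkc⟩
    · intro hne1
      obtain ⟨hndp, hiff⟩ := o5 hne1
      refine ⟨hndp, fun k => ⟨fun hk => ?_, fun hk => ?_⟩⟩
      · obtain ⟨hk1, hk2⟩ := (hiff k).mp hk
        exact ⟨hk1, by rw [hrw k hk1]; exact hk2⟩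
      · exact (hiff k).mpr ⟨hk.1, by rw [← hrw k hk.1]; exact hk.2⟩
  have hmcj1 : 1 ≤ st.2.2[j]! := (hidx j hj).1
  simp only [pvStepA, ← hs, Int.toNat_natCast, hd', hcnt, pvGetD_getBang st.2.2 j 0 hjc]
  by_cases hlt : st.2.2[j]! < (ks.count s : Int) + 1
  · rw [if_pos hlt]
    have hn2 : (2:Int) ≤ (ks.count s : Int) + 1 := by omega
    rw [pvGetD_getBang (st.2.2.set j ((ks.count s : Int) + 1)) j 0 (by simpa using hjc),
      pvSet_getBang_self st.2.2 j _ hjc]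
    rw [if_pos (by simp; omega)]
    rw [pvGetD_getBang (st.2.1.set j [s]) j [] (by simpa using hjm),
      pvSet_getBang_self st.2.1 j _ hjm]
    rw [if_pos (List.mem_singleton.mpr rfl)]
    refine ⟨rfl, by simpa using hlm, by simpa using hlc, ?_⟩
    intro i hi
    dsimp only
    by_cases hij : i = j
    · subst hij
      rw [pvSet_getBang_self st.2.2 i _ hjc, pvSet_getBang_self st.2.1 i _ hjm]
      refine ⟨by omega, ?_, Or.inr ⟨s, hlen, by rw [hcount s, if_pos rfl]⟩,
        by omega, ?_⟩
      · intro k hk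
        rw [hcount k]
        by_cases hks : k = s
        · subst hks; simp
        · rw [if_neg hks, add_zero]
          have := (hidx i hi).2.1 k hk
          omega
      · intro _
        refine ⟨List.nodup_singleton s, fun k => ⟨fun hk => ?_, fun hk => ?_⟩⟩
        · rw [List.mem_singleton] at hk; subst hk
          exact ⟨hlen, by rw [hcount s, if_pos rfl]⟩
        · obtain ⟨hk1, hk2⟩ := hk
          rw [List.mem_singleton]
          by_contra hks
          rw [hcount k, if_neg hks, add_zero] at hk2
          have := (hidx i hi).2.1 k hk1
          omega
    · rw [pvSet_getBang_ne st.2.2 i j _ (by rw [hlc]; exact hi) (fun h => hij h.symm),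
        pvSet_getBang_ne st.2.1 i j _ (by rw [hlm]; exact hi) (fun h => hij h.symm)]
      exact hother i hi hij
  · rw [if_neg hlt]
    simp only [pvGetD_getBang st.2.2 j 0 hjc, pvGetD_getBang st.2.1 j [] hjm]
    have hle : (ks.count s : Int) + 1 ≤ st.2.2[j]! := by omega
    by_cases hcond : st.2.2[j]! = (ks.count s : Int) + 1 ∧ st.2.2[j]! ≠ 1
    · rw [if_pos (by simp only [Bool.and_eq_true, beq_iff_eq, bne_iff_ne, ne_eq]; exact ⟨hcond.1, by simpa using hcond.2⟩)]
      obtain ⟨heq, hne1⟩ := hcond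
      obtain ⟨hndp, hiff⟩ := (hidx j hj).2.2.2.2 hne1
      by_cases hmem : s ∈ st.2.1[j]!
      · rw [if_pos hmem]
        refine ⟨rfl, hlm, hlc, ?_⟩
        intro i hi
        dsimp only
        by_cases hij : i = j
        · subst hij
          refine ⟨by omega, ?_, Or.inr ⟨s, hlen, by rw [hcount s, if_pos rfl]; omega⟩,
            fun h => absurd h hne1, fun _ => ⟨hndp, fun k => ⟨fun hk => ?_, fun hk => ?_⟩⟩⟩
          · intro k hk
            rw [hcount k]
            by_cases hks : k = s
            · subst hks; omega
            · rw [if_neg hks, add_zero]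
              exact (hidx i hi).2.1 k hk
          · obtain ⟨hk1, hk2⟩ := (hiff k).mp hk
            by_cases hks : k = s
            · subst hks; exact ⟨hk1, by rw [hcount s, if_pos rfl]; omega⟩
            · exact ⟨hk1, by rw [hcount k, if_neg hks, add_zero]; exact hk2⟩
          · obtain ⟨hk1, hk2⟩ := hk
            by_cases hks : k = s
            · subst hks; exact hmem
            · rw [hcount k, if_neg hks, add_zero] at hk2
              exact (hiff k).mpr ⟨hk1, hk2⟩
        · exact hother i hi hij
      · rw [if_neg hmem]
        refine ⟨rfl, by simpa using hlm, hlc, ?_⟩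
        intro i hi
        dsimp only
        by_cases hij : i = j
        · subst hij
          rw [pvSet_getBang_self st.2.1 i _ hjm]
          refine ⟨by omega, ?_, Or.inr ⟨s, hlen, by rw [hcount s, if_pos rfl]; omega⟩,
            fun h => absurd h hne1, fun _ => ⟨?_, fun k => ⟨fun hk => ?_, fun hk => ?_⟩⟩⟩
          · intro k hk
            rw [hcount k]
            by_cases hks : k = s
            · subst hks; omega
            · rw [if_neg hks, add_zero]
              exact (hidx i hi).2.1 k hk
          · rw [List.nodup_append]
            refine ⟨hndp, List.nodup_singleton s, ?_⟩
            intro x hx y hy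
            rw [List.mem_singleton] at hy
            subst hy
            exact fun h => hmem (h ▸ hx)
          · rw [List.mem_append, List.mem_singleton] at hk
            rcases hk with hk | hk
            · obtain ⟨hk1, hk2⟩ := (hiff k).mp hk
              have hks : k ≠ s := fun h => hmem (h ▸ hk)
              exact ⟨hk1, by rw [hcount k, if_neg hks, add_zero]; exact hk2⟩
            · subst hk; exact ⟨hlen, by rw [hcount s, if_pos rfl]; omega⟩
          · obtain ⟨hk1, hk2⟩ := hk
            rw [List.mem_append, List.mem_singleton]
            by_cases hks : k = s
            · exact Or.inr hks
            · rw [hcount k, if_neg hks, add_zero] at hk2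
              exact Or.inl ((hiff k).mpr ⟨hk1, hk2⟩)
        · rw [pvSet_getBang_ne st.2.1 i j _ (by rw [hlm]; exact hi) (fun h => hij h.symm)]
          exact hother i hi hij
    · rw [if_neg (by simpa using hcond)]
      refine ⟨rfl, hlm, hlc, ?_⟩
      intro i hi
      dsimp only
      by_cases hij : i = j
      · subst hij
        refine ⟨by omega, ?_, ?_, (hidx i hi).2.2.2.1, ?_⟩
        · intro k hk
          rw [hcount k]
          by_cases hks : k = s
          · subst hks; omega
          · rw [if_neg hks, add_zero]
            exact (hidx i hi).2.1 k hk
        · rcases (hidx i hi).2.2.1 with h1 | ⟨k, hk1, hk2⟩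
          · exact Or.inl h1
          · have hks : k ≠ s := by
              intro h; subst h; omega
            exact Or.inr ⟨k, hk1, by rw [hcount k, if_neg hks, add_zero]; exact hk2⟩
        · intro hne1
          obtain ⟨hndp, hiff⟩ := (hidx i hi).2.2.2.2 hne1
          have hneq : st.2.2[i]! ≠ (ks.count s : Int) + 1 := fun h => hcond ⟨h, hne1⟩
          refine ⟨hndp, fun k => ⟨fun hk => ?_, fun hk => ?_⟩⟩
          · obtain ⟨hk1, hk2⟩ := (hiff k).mp hk
            have hks : k ≠ s := by
              intro h; subst h; omega
            exact ⟨hk1, by rw [hcount k, if_neg hks, add_zero]; exact hk2⟩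
          · obtain ⟨hk1, hk2⟩ := hk
            by_cases hks : k = s
            · subst hks; rw [hcount s, if_pos rfl] at hk2; omega
            · rw [hcount k, if_neg hks, add_zero] at hk2
              exact (hiff k).mpr ⟨hk1, hk2⟩
      · exact hother i hi hij

theorem pvInv_fold (course : List Int)
    (E : List (Int × List Char))
    (hE : ∀ e ∈ E, ∃ k : Nat, ∃ hk : k < course.length,
      e.1 = (k : Int) ∧ PySem.Str.len (pvKey e.2) = course[k] ∧
      ∀ (i : Nat) (hi : i < course.length), i ≠ k → course[i] ≠ course[k])
    (ks : List String) (st : PySem.Dict String Int × List (List String) × List Int)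
    (h : pvInv course ks st) :
    pvInv course (ks ++ E.map (fun e => pvKey e.2))
      (E.foldl (fun st e => pvStepA st e.1 e.2) st) := by
  induction E generalizing ks st with
  | nil => simpa using h
  | cons e E ih =>
    obtain ⟨k, hk, he1, he2, he3⟩ := hE e (by simp)
    have hstep := pvInv_step course ks st h k hk e.2 he2 he3
    have := ih (fun e' h' => hE e' (by simp [h'])) (ks ++ [pvKey e.2])
      (pvStepA st (k : Int) e.2) hstep
    rw [← he1] at this
    simpa [List.append_assoc] using this

theorem pvInv_init (course : List Int) :
    pvInv course []
      (PySem.Dict.empty, (List.range course.length).map (fun _ => ([] : List String)),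
        List.replicate course.length (1 : Int)) := by
  refine ⟨rfl, by simp, by simp, ?_⟩
  intro i hi
  dsimp only
  have hmc : (List.replicate course.length (1 : Int))[i]! = 1 := by
    rw [getElem!_pos _ i (by simpa using hi)]; simp
  have hmm : ((List.range course.length).map (fun _ => ([] : List String)))[i]! = [] := by
    rw [getElem!_pos _ i (by simpa using hi)]; simp
  refine ⟨by omega, by simp [hmc], Or.inl hmc, fun _ => hmm, fun h => absurd hmc h⟩

-- B's per-size winner list, in closed form
theorem pvWinners (ks : List String) (c best : Int) :
    (((PySem.Dict.counter ks).items.filter (fun kv => PySem.Str.len kv.1 == c)).filter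
        (fun kv => kv.2 == best)).map (fun kv => kv.1)
    = (PySem.Set.ofList ks).filter
        (fun k => ((ks.count k : Int) == best) && (PySem.Str.len k == c)) := by
  rw [PySem.Dict.items_counter, List.filter_map, List.filter_map, List.filter_filter,
    List.map_map]
  simp only [Function.comp]
  exact List.map_id _

-- B's contribution for course entry c is a permutation of A's final maxMenu entry at i
theorem pvPerIndex (course : List Int) (ks : List String) (st : PySem.Dict String Int × List (List String) × List Int)
    (h : pvInv course ks st) (i : Nat) (hi : i < course.length) :
    (st.2.1[i]!).Perm
      (let group := (PySem.Dict.counter ks).items.filter (fun kv => PySem.Str.len kv.1 == course[i])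
       let best : Int := PySem.List.maxD (group.map (fun kv => kv.2)) (fun v => v) 0
       if 2 ≤ best then (group.filter (fun kv => kv.2 == best)).map (fun kv => kv.1)
       else ([] : List String)) := by
  obtain ⟨hd, hlm, hlc, hidx⟩ := h
  obtain ⟨o1, o2, o3, o4, o5⟩ := hidx i hi
  dsimp only
  have hvals : ((PySem.Dict.counter ks).items.filter
        (fun kv => PySem.Str.len kv.1 == course[i])).map (fun kv => kv.2)
      = ((PySem.Set.ofList ks).filter (fun k => PySem.Str.len k == course[i])).map
        (fun k => (ks.count k : Int)) := by
    rw [PySem.Dict.items_counter, List.filter_map, List.map_map]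
    rfl
  rw [hvals, pvWinners]
  have hmemvals : ∀ v : Int, v ∈ ((PySem.Set.ofList ks).filter
        (fun k => PySem.Str.len k == course[i])).map (fun k => (ks.count k : Int)) →
      v ≤ st.2.2[i]! := by
    intro v hv
    rw [List.mem_map] at hv
    obtain ⟨k, hk, rfl⟩ := hv
    rw [List.mem_filter] at hk
    exact o2 k (by simpa using hk.2)
  by_cases h1 : st.2.2[i]! = 1
  · rw [o4 h1]
    rw [if_neg ?hbest]
    case hbest =>
      intro h2
      unfold PySem.List.maxD at h2
      cases hm : PySem.List.max? (((PySem.Set.ofList ks).filter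
          (fun k => PySem.Str.len k == course[i])).map (fun k => (ks.count k : Int)))
          (fun v => v) with
      | none => rw [hm] at h2; simp at h2
      | some m =>
        rw [hm] at h2
        simp only [Option.getD_some] at h2
        have := hmemvals m (PySem.List.max?_mem hm)
        omega
  · obtain ⟨hndp, hiff⟩ := o5 h1
    rcases o3 with h | ⟨k0, hk0l, hk0c⟩
    · exact absurd h h1
    have hmc2 : 2 ≤ st.2.2[i]! := by omega
    have hk0mem : k0 ∈ ks := by
      have : 0 < ks.count k0 := by omega
      exact List.count_pos_iff.mp this
    have hk0v : (ks.count k0 : Int) ∈ ((PySem.Set.ofList ks).filter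
        (fun k => PySem.Str.len k == course[i])).map (fun k => (ks.count k : Int)) := by
      rw [List.mem_map]
      exact ⟨k0, List.mem_filter.mpr ⟨(PySem.Set.mem_ofList ks k0).mpr hk0mem,
        by simp only [beq_iff_eq]; exact hk0l⟩, rfl⟩
    cases hm : PySem.List.max? (((PySem.Set.ofList ks).filter
        (fun k => PySem.Str.len k == course[i])).map (fun k => (ks.count k : Int)))
        (fun v => v) with
    | none =>
      rw [PySem.List.max?_eq_none_iff] at hm
      rw [hm] at hk0v
      exact absurd hk0v (List.not_mem_nil)
    | some m =>
      have hbestm : PySem.List.maxD (((PySem.Set.ofList ks).filter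
          (fun k => PySem.Str.len k == course[i])).map (fun k => (ks.count k : Int)))
          (fun v => v) 0 = m := by
        unfold PySem.List.maxD; rw [hm]; rfl
      have hmeq : m = st.2.2[i]! := by
        have h1m := PySem.List.max?_isMax hm (ks.count k0 : Int) hk0v
        have h2m := hmemvals m (PySem.List.max?_mem hm)
        simp only at h1m
        omega
      rw [hbestm, hmeq]
      rw [if_pos hmc2]
      apply (List.perm_ext_iff_of_nodup hndp ((PySem.Set.nodup_ofList ks).filter _)).mpr
      intro a
      constructor
      · intro ha
        obtain ⟨ha1, ha2⟩ := (hiff a).mp ha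
        refine List.mem_filter.mpr ⟨(PySem.Set.mem_ofList ks a).mpr ?_, ?_⟩
        · rw [← ha2] at hmc2
          exact List.count_pos_iff.mp (by omega)
        · simp only [Bool.and_eq_true, beq_iff_eq]
          exact ⟨ha2, ha1⟩
      · intro ha
        obtain ⟨hmem', hp⟩ := List.mem_filter.mp ha
        simp only [Bool.and_eq_true, beq_iff_eq] at hp
        exact (hiff a).mpr ⟨hp.2, hp.1⟩

-- ===== VERDICT (by name: the statement is the Claim_ definition above) =====
theorem pvFoldl_append_menus (L : List (List String)) (acc : List String) :
    L.foldl (fun acc menus => menus.foldl (fun acc menu => acc ++ [menu]) acc) acc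
      = acc ++ L.flatten := by
  have hbody : (fun (acc : List String) (menus : List String) =>
      menus.foldl (fun acc menu => acc ++ [menu]) acc)
      = (fun acc menus => acc ++ menus) := by
    funext acc menus
    exact PySem.List.foldl_append_singleton_eq_self menus acc
  rw [hbody, PySem.List.foldl_append_eq_flatten]

set_option maxHeartbeats 1000000 in
theorem solution_spec : Claim_equal_solution := by
  intro orders course _hdom hpre
  obtain ⟨hnn, hpair⟩ := hpre
  unfold Spec_solution
  have hpair' := List.pairwise_iff_getElem.mp hpair
  have hE : ∀ e ∈ pvEvents orders course, ∃ k : Nat, ∃ hk : k < course.length,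
      e.1 = (k : Int) ∧ PySem.Str.len (pvKey e.2) = course[k] ∧
      ∀ (i : Nat) (hi : i < course.length), i ≠ k → course[i] ≠ course[k] := by
    intro e he
    obtain ⟨k, hk, h1, h2, o, ho, hle⟩ := pvEvents_ok orders course hnn e he
    refine ⟨k, hk, h1, h2, ?_⟩
    intro i hi hik heq
    rcases Nat.lt_or_ge i k with hlt | hge
    · have := hpair' i k hi hk hlt heq o ho
      omega
    · have hki : k < i := by omega
      have := hpair' k i hk hi hki heq.symm o ho
      omega
  have hinv := pvInv_fold course (pvEvents orders course) hE []
    (PySem.Dict.empty, (List.range course.length).map (fun _ => ([] : List String)),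
      List.replicate course.length (1 : Int)) (pvInv_init course)
  rw [List.nil_append] at hinv
  simp only [solution, solution_alt]
  rw [pvA_flatten orders course, pvB_flatten orders course]
  rw [pvFoldl_append_menus]
  rw [List.nil_append]
  have hbodyB : (fun (acc : List String) (c : Int) =>
      let group := (PySem.Dict.counter ((pvEvents orders course).map
        (fun e => pvKey e.2))).items.filter (fun kv => PySem.Str.len kv.1 == c)
      let best : Int := PySem.List.maxD (group.map (fun kv => kv.2)) (fun v => v) 0
      if 2 ≤ best then acc ++ (group.filter (fun kv => kv.2 == best)).map (fun kv => kv.1)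
      else acc)
      = (fun acc c => acc ++
        (let group := (PySem.Dict.counter ((pvEvents orders course).map
          (fun e => pvKey e.2))).items.filter (fun kv => PySem.Str.len kv.1 == c)
         let best : Int := PySem.List.maxD (group.map (fun kv => kv.2)) (fun v => v) 0
         if 2 ≤ best then (group.filter (fun kv => kv.2 == best)).map (fun kv => kv.1)
         else [])) := by
    funext acc c
    dsimp only
    split_ifs with h
    · rfl
    · rw [List.append_nil]
  rw [hbodyB, PySem.List.foldl_append_eq_flatMap, List.nil_append, List.flatMap_def]
  apply PySem.List.sorted_eq_sorted_of_perm _ _ _ (fun a b h => h)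
  apply List.Perm.flatten_congr
  rw [List.forall₂_iff_get]
  refine ⟨by rw [hinv.2.1, List.length_map], ?_⟩
  intro i h1 h2
  rw [List.get_eq_getElem, List.get_eq_getElem, List.getElem_map,
    ← getElem!_pos _ i h1]
  exact pvPerIndex course ((pvEvents orders course).map (fun e => pvKey e.2))
    _ hinv i (by rw [← hinv.2.1]; exact h1)
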